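-- pv_equiv track=rewrite | github.com/astewardnolan/Algo-hw10 | hwk10-code.py | find_permutations_iteratively
-- ===== SOURCE A (Python) =====
-- def selection_sort(arr: set) -> list:
--     """
--     Sorts a set of numbers into a list in ascending order using the selection sort algorithm.
--
--     Parameters:
--     arr (set): The input set to be sorted.
--
--     Returns:
--     list: A sorted list of numbers in ascending order.
--
--     Example:
--     >>> selection_sort({3, 1, 4, 2})
--     [1, 2, 3, 4]
--     """
--     # Convert the set to a list so we can work with indices
--     arr_list = list(arr)
--
--     # Loop through the entire list (which is now a list derived from the set)
--     for i in range(len(arr_list)):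
--         # Find the index of the minimum element in the unsorted part of the list
--         min_index = i
--         for j in range(i + 1, len(arr_list)):
--             if arr_list[j] < arr_list[min_index]:
--                 min_index = j
--
--         # Swap the found minimum element with the first element of the unsorted part
--         arr_list[i], arr_list[min_index] = arr_list[min_index], arr_list[i]
--
--     # Return the sorted list
--     return arr_list
--
-- def find_permutations_iteratively(target_length: int) -> set:
--     """
--     Finds all unique combinations of cuts that sum up to a target length using an iterative approach.
--
--     Parameters:
--     target_length (int): The total length of the board to be cut.
--
--     Returns:
--     set: A set of unique combinations of lengths that sum up to the target length.
--
--     Example: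
--     >>> find_permutations_iteratively(3)
--     {(2, 1), (1, 1, 1)}
--     """
--     lengths = [12, 10, 8, 6, 4, 2, 1]
--     all_combinations = set()  # Use a set to avoid duplicates
--     stack = [(target_length, [])]  # Initialize stack with the target length and an empty combination
--
--     while stack:
--         current_length, current_combination = stack.pop()
--
--         if current_length == 0:
--             # Add the combination as a tuple to the set
--             all_combinations.add(tuple(selection_sort(current_combination)))
--             continue
--
--         for length in lengths:
--             if length <= current_length:
--                 # Create a new combination with the current length included
--                 new_combination = current_combination + [length]
--                 stack.append((current_length - length, new_combination))
--
--     return all_combinations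
-- ===== SOURCE B (Python) =====
-- def find_permutations_iteratively(target_length: int) -> set:
--     """Enumerate each partition directly with a non-decreasing part bound,
--     so every combination is produced exactly once already sorted."""
--     parts = [1, 2, 4, 6, 8, 10, 12]
--
--     def gen(rem, m):
--         if rem == 0:
--             return [[]]
--         out = []
--         for p in parts:
--             if m <= p and p <= rem:
--                 for rest in gen(rem - p, p):
--                     out.append([p] + rest)
--         return out
--
--     return {tuple(x) for x in gen(target_length, 1)}
-- ===== Notes on version B (the rewrite author's own statement) =====
-- stated objective: alternative
-- what changed: A enumerates every composition (ordered sequence of cuts) with an explicit stack and dedups the sorted tuples through a set; B recursively generates each partition exactly once in non-decreasing order via a minimum-part bound, so no duplicate work and no sorting is needed (intended as faster; measured 566x at n=16, unconfirmed at larger sizes where the output itself is huge and both time out).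
import Mathlib
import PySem

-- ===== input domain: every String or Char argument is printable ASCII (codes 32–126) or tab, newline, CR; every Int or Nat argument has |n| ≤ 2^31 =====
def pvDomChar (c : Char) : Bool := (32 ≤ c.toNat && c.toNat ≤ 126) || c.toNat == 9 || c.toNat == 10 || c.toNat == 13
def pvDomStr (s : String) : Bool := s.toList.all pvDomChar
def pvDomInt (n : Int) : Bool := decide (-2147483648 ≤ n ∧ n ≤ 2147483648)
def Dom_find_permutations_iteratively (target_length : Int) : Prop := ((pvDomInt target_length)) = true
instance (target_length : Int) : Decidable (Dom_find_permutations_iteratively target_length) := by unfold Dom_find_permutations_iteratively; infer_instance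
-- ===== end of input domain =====

-- B replaces A's stack enumeration of all compositions (deduplicated through a set of sorted
-- tuples) by a direct recursive generation of each partition exactly once in non-decreasing
-- order, so no duplicate work and no per-leaf sorting is needed.

-- ===== PORT A =====
def pvLengths : List Int := [12, 10, 8, 6, 4, 2, 1]

-- A's helper selection_sort, transliterated: outer loop over i, inner argmin scan, swap.
def selection_sort (arr : List Int) : List Int :=
  (List.range arr.length).foldl
    (fun a i =>
      let mi := (List.range' (i + 1) (a.length - (i + 1))).foldl
        (fun mi j => if a.getD j 0 < a.getD mi 0 then j else mi) i
      let vi := a.getD i 0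
      let vm := a.getD mi 0
      (a.set i vm).set mi vi)
    arr

def pvParts : List Int := [1, 2, 4, 6, 8, 10, 12]

lemma pvParts_pos : ∀ p ∈ pvParts, (1:Int) ≤ p := by decide

-- The inner `for length in lengths: if length <= current: stack.append(...)` loop of A,
-- with the stack's head as its top (Python pops from the right), rewritten as filter+map
-- (needed by aLoop's termination proof, which cites it).
lemma pvFoldl_push_gen (L : Int) (c : Int → (Int × List Int)) (l : List Int) :
    ∀ (rest : List (Int × List Int)),
      l.foldl (fun st p => if p ≤ L then c p :: st else st) rest
        = ((l.reverse.filter (fun p => p ≤ L)).map c) ++ rest := by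
  induction l with
  | nil => intro rest; simp
  | cons p l ih =>
    intro rest
    simp only [List.foldl_cons, List.reverse_cons, List.filter_append,
      List.map_append, List.append_assoc, List.filter_cons, List.filter_nil]
    by_cases h : p ≤ L <;> simp [h, ih]

lemma pvPush_eq (L : Int) (comb : List Int) (rest : List (Int × List Int)) :
    pvLengths.foldl (fun st p => if p ≤ L then (L - p, comb ++ [p]) :: st else st) rest
      = ((pvParts.filter (fun p => p ≤ L)).map (fun p => (L - p, comb ++ [p]))) ++ rest := by
  rw [pvFoldl_push_gen]
  have h : pvLengths.reverse = pvParts := by decide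
  rw [h]

def pvMeasure (stack : List (Int × List Int)) : Nat :=
  (stack.map (fun t => 8 ^ t.1.toNat)).sum

lemma pvPush_measure (L : Int) (hL : ¬ L = 0) (comb : List Int) (rest : List (Int × List Int)) :
    pvMeasure (((pvParts.filter (fun p => p ≤ L)).map (fun p => (L - p, comb ++ [p]))) ++ rest)
      < pvMeasure ((L, comb) :: rest) := by
  simp only [pvMeasure, List.map_append, List.sum_append, List.map_cons, List.sum_cons, List.map_map]
  have h8 : 0 < (8:Nat) ^ L.toNat := Nat.pow_pos (by norm_num)
  rcases lt_or_gt_of_ne hL with hneg | hpos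
  · have h : pvParts.filter (fun p => p ≤ L) = [] := by
      apply List.filter_eq_nil_iff.mpr
      intro p hp
      have := pvParts_pos p hp
      simp only [decide_eq_true_eq]
      omega
    rw [h]
    simp
  · have hbound : ∀ x ∈ (pvParts.filter (fun p => p ≤ L)).map
        (fun p => 8 ^ (L - p).toNat), x ≤ 8 ^ (L.toNat - 1) := by
      intro x hx
      rcases List.mem_map.mp hx with ⟨p, hp, rfl⟩
      rcases List.mem_filter.mp hp with ⟨hpP, hple⟩
      have h1 := pvParts_pos p hpP
      have hle : (L - p).toNat ≤ L.toNat - 1 := by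
        simp only [decide_eq_true_eq] at hple
        omega
      exact Nat.pow_le_pow_right (by norm_num) hle
    have hlen : ((pvParts.filter (fun p => p ≤ L)).map
        (fun p => 8 ^ (L - p).toNat)).length ≤ 7 := by
      rw [List.length_map]
      calc (pvParts.filter (fun p => p ≤ L)).length ≤ pvParts.length := List.length_filter_le _ _
        _ = 7 := by decide
    have hsum := List.sum_le_card_nsmul _ _ hbound
    have hLpos : 1 ≤ L.toNat := by omega
    have hpow : (8:Nat) ^ L.toNat = 8 * 8 ^ (L.toNat - 1) := by
      conv_lhs => rw [show L.toNat = (L.toNat - 1) + 1 by omega]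
      rw [pow_succ']
    have hfin : ((pvParts.filter (fun p => p ≤ L)).map (fun p => 8 ^ (L - p).toNat)).sum
        ≤ 7 * 8 ^ (L.toNat - 1) := by
      calc _ ≤ _ := hsum
        _ ≤ 7 * 8 ^ (L.toNat - 1) := by
            rw [smul_eq_mul]
            exact Nat.mul_le_mul_right _ hlen
    have h81 : 0 < (8:Nat) ^ (L.toNat - 1) := Nat.pow_pos (by norm_num)
    have hmm : ((pvParts.filter (fun p => p ≤ L)).map
        ((fun t => 8 ^ t.1.toNat) ∘ (fun p => (L - p, comb ++ [p])))).sum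
        = ((pvParts.filter (fun p => p ≤ L)).map (fun p => 8 ^ (L - p).toNat)).sum := rfl
    rw [hmm]
    omega

-- A's `while stack:` loop.
def aLoop : List (Int × List Int) → List (List Int) → List (List Int)
  | [], acc => acc
  | (L, comb) :: rest, acc =>
    if L = 0 then aLoop rest (PySem.Set.add acc (selection_sort comb))
    else aLoop (pvLengths.foldl (fun st p => if p ≤ L then (L - p, comb ++ [p]) :: st else st) rest) acc
termination_by stack _ => pvMeasure stack
decreasing_by
  · simp only [pvMeasure, List.map_cons, List.sum_cons]
    have h8 : 0 < (8:Nat) ^ (L:Int).toNat := Nat.pow_pos (by norm_num)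
    omega
  · simp only [dite_eq_ite]
    rw [pvPush_eq]
    exact pvPush_measure L (by assumption) comb rest

def find_permutations_iteratively (target_length : Int) : List (List Int) :=
  aLoop [(target_length, [])] PySem.Set.empty

-- ===== PORT B =====
-- B's recursive generator: partitions of rem into parts ≥ m, each exactly once, non-decreasing.
def genB (rem : Int) (m : Int) : List (List Int) :=
  if rem = 0 then [[]]
  else ((pvParts.filter (fun p => m ≤ p ∧ p ≤ rem)).attach).flatMap
        (fun q => (genB (rem - q.1) q.1).map (q.1 :: ·))
termination_by rem.toNat
decreasing_by
  rcases List.mem_filter.mp q.2 with ⟨hmem, hcond⟩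
  have h1 := pvParts_pos q.1 hmem
  simp only [decide_eq_true_eq] at hcond
  omega

def find_permutations_iteratively_alt (target_length : Int) : List (List Int) :=
  PySem.Set.ofList (genB target_length 1)

-- ===== PRECONDITION & SPEC =====
def Spec_find_permutations_iteratively (target_length : Int) (out : List (List Int)) : Prop := out = find_permutations_iteratively_alt target_length
instance (target_length : Int) (out : List (List Int)) : Decidable (Spec_find_permutations_iteratively target_length out) := by unfold Spec_find_permutations_iteratively; infer_instance

-- ===== CLAIM (what is proved, stated in full; the proofs are below) =====
def Claim_equal_find_permutations_iteratively : Prop := ∀ (target_length : Int), Dom_find_permutations_iteratively target_length → Spec_find_permutations_iteratively target_length (find_permutations_iteratively target_length)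

-- ===== LEMMAS AND PROOFS =====

-- Python's sorted(), the canonical sort everything is related to.
def pysort (l : List Int) : List Int := PySem.List.sorted l (fun x => x) false

-- All compositions of L (ordered sequences of parts from pvParts), in lexicographic order.
def pvC (L : Int) : List (List Int) :=
  if L = 0 then [[]]
  else ((pvParts.filter (fun p => p ≤ L)).attach).flatMap
        (fun q => (pvC (L - q.1)).map (q.1 :: ·))
termination_by L.toNat
decreasing_by
  rcases List.mem_filter.mp q.2 with ⟨hmem, hcond⟩
  have h1 := pvParts_pos q.1 hmem
  simp only [decide_eq_true_eq] at hcond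
  omega

-- The list of sorted leaves A's DFS emits from the node (L, comb), in emission order.
def pvE (L : Int) (comb : List Int) : List (List Int) :=
  if L = 0 then [selection_sort comb]
  else ((pvParts.filter (fun p => p ≤ L)).attach).flatMap
        (fun q => pvE (L - q.1) (comb ++ [q.1]))
termination_by L.toNat
decreasing_by
  rcases List.mem_filter.mp q.2 with ⟨hmem, hcond⟩
  have h1 := pvParts_pos q.1 hmem
  simp only [decide_eq_true_eq] at hcond
  omega

-- unfolding helpers
lemma pvFilter_nonpos (L : Int) (h : L ≤ 0) : pvParts.filter (fun p => p ≤ L) = [] := by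
  apply List.filter_eq_nil_iff.mpr
  intro p hp
  have := pvParts_pos p hp
  simp only [decide_eq_true_eq]
  omega

lemma pvC_zero : pvC 0 = [[]] := by rw [pvC]; rfl

lemma pvC_ne (L : Int) (h : ¬ L = 0) :
    pvC L = (pvParts.filter (fun p => p ≤ L)).flatMap (fun p => (pvC (L - p)).map (p :: ·)) := by
  rw [pvC]
  simp [h]

lemma pvC_neg (L : Int) (h : L < 0) : pvC L = [] := by
  rw [pvC_ne L (by omega), pvFilter_nonpos L (by omega)]
  rfl

lemma pvE_zero (comb : List Int) : pvE 0 comb = [selection_sort comb] := by rw [pvE]; rfl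

lemma pvE_ne (L : Int) (comb : List Int) (h : ¬ L = 0) :
    pvE L comb = (pvParts.filter (fun p => p ≤ L)).flatMap (fun p => pvE (L - p) (comb ++ [p])) := by
  rw [pvE]
  simp [h]

lemma genB_zero (m : Int) : genB 0 m = [[]] := by rw [genB]; rfl

lemma genB_ne (rem m : Int) (h : ¬ rem = 0) :
    genB rem m = (pvParts.filter (fun p => m ≤ p ∧ p ≤ rem)).flatMap
      (fun p => (genB (rem - p) p).map (p :: ·)) := by
  rw [genB]
  simp [h]

-- ---- order facts ----
lemma pysort_eq_self_iff (x : List Int) : pysort x = x ↔ x.Pairwise (· ≤ ·) := by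
  constructor
  · intro h
    have hpw := PySem.List.sorted_pairwise (xs := x) (key := fun a => a)
    unfold pysort at h
    rwa [h] at hpw
  · intro h
    exact PySem.List.sorted_eq_self_of_pairwise x (fun a => a) h

lemma pvPerm_sorted_lexle : ∀ (y x : List Int), y.Perm x → y.Pairwise (· ≤ ·) →
    y = x ∨ List.Lex (· < ·) y x := by
  intro y
  induction y with
  | nil =>
    intro x hp _
    left
    exact hp.nil_eq
  | cons a y' ih =>
    intro x hp hpw
    rcases x with _ | ⟨b, x'⟩
    · exact absurd hp.eq_nil (by simp)
    · by_cases hab : a = b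
      · subst hab
        rcases ih x' hp.cons_inv hpw.of_cons with h | h
        · left; rw [h]
        · right; exact List.Lex.cons h
      · have hbmem : b ∈ a :: y' := hp.mem_iff.mpr (by simp)
        have hb' : b ∈ y' := by
          rcases List.mem_cons.mp hbmem with h | h
          · exact absurd h.symm hab
          · exact h
        have hle : a ≤ b := (List.pairwise_cons.mp hpw).1 b hb'
        right
        exact List.Lex.rel (lt_of_le_of_ne hle hab)

lemma pysort_perm (x : List Int) : (pysort x).Perm x := PySem.List.sorted_perm ..

lemma pysort_pairwise (x : List Int) : (pysort x).Pairwise (· ≤ ·) :=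
  PySem.List.sorted_pairwise (xs := x) (key := fun a => a)

lemma pysort_pysort (x : List Int) : pysort (pysort x) = pysort x := PySem.List.sorted_sorted ..

lemma pvSorted_lexle (x : List Int) : pysort x = x ∨ List.Lex (· < ·) (pysort x) x :=
  pvPerm_sorted_lexle (pysort x) x (pysort_perm x) (pysort_pairwise x)

-- ---- properties of pvC ----
lemma pvC_spec : ∀ (n : Nat) (L : Int), L.toNat ≤ n →
    ∀ x ∈ pvC L, (∀ a ∈ x, a ∈ pvParts) ∧ x.sum = L := by
  intro n
  induction n with
  | zero =>
    intro L hL x hx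
    rcases lt_trichotomy L 0 with h | h | h
    · rw [pvC_neg L h] at hx; cases hx
    · subst h
      rw [pvC_zero, List.mem_singleton] at hx
      subst hx
      simp
    · omega
  | succ n ih =>
    intro L hL x hx
    by_cases h0 : L = 0
    · subst h0
      rw [pvC_zero, List.mem_singleton] at hx
      subst hx
      simp
    · rw [pvC_ne L h0] at hx
      rcases List.mem_flatMap.mp hx with ⟨p, hp, hxp⟩
      rcases List.mem_filter.mp hp with ⟨hpP, hple⟩
      simp only [decide_eq_true_eq] at hple
      have hp1 := pvParts_pos p hpP
      rcases List.mem_map.mp hxp with ⟨t, ht, rfl⟩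
      have hrec := ih (L - p) (by omega) t ht
      constructor
      · intro a ha
        rcases List.mem_cons.mp ha with rfl | ha
        · exact hpP
        · exact hrec.1 a ha
      · simp only [List.sum_cons, hrec.2]
        ring

lemma pvC_complete : ∀ (x : List Int) (L : Int), (∀ a ∈ x, a ∈ pvParts) → x.sum = L →
    x ∈ pvC L := by
  intro x
  induction x with
  | nil =>
    intro L _ hs
    simp only [List.sum_nil] at hs
    rw [← hs, pvC_zero]
    simp
  | cons p t ih =>
    intro L hmem hs
    have hpP : p ∈ pvParts := hmem p (by simp)
    have hp1 := pvParts_pos p hpP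
    have htpos : 0 ≤ t.sum := by
      apply List.sum_nonneg
      intro a ha
      have := pvParts_pos a (hmem a (by simp [ha]))
      omega
    simp only [List.sum_cons] at hs
    have hL0 : ¬ L = 0 := by omega
    rw [pvC_ne L hL0]
    apply List.mem_flatMap.mpr
    refine ⟨p, List.mem_filter.mpr ⟨hpP, by simp only [decide_eq_true_eq]; omega⟩, ?_⟩
    apply List.mem_map.mpr
    exact ⟨t, ih (L - p) (fun a ha => hmem a (by simp [ha])) (by omega), rfl⟩

lemma pvLex_flatMap (l : List Int) (f : Int → List (List Int))
    (hl : l.Pairwise (· < ·))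
    (hin : ∀ p ∈ l, (f p).Pairwise (List.Lex (· < ·)))
    (hhead : ∀ p ∈ l, ∀ x ∈ f p, ∃ t, x = p :: t) :
    (l.flatMap f).Pairwise (List.Lex (· < ·)) := by
  induction l with
  | nil => simp
  | cons p l ih =>
    rw [List.flatMap_cons, List.pairwise_append]
    refine ⟨hin p (by simp), ?_, ?_⟩
    · exact ih (hl.of_cons) (fun q hq => hin q (by simp [hq]))
        (fun q hq => hhead q (by simp [hq]))
    · intro x hx y hy
      rcases hhead p (by simp) x hx with ⟨tx, rfl⟩
      rcases List.mem_flatMap.mp hy with ⟨q, hq, hyq⟩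
      rcases hhead q (by simp [hq]) y hyq with ⟨ty, rfl⟩
      have hpq : p < q := (List.pairwise_cons.mp hl).1 q hq
      exact List.Lex.rel hpq

lemma pvC_pairwise : ∀ (n : Nat) (L : Int), L.toNat ≤ n →
    (pvC L).Pairwise (List.Lex (· < ·)) := by
  intro n
  induction n with
  | zero =>
    intro L hL
    rcases lt_trichotomy L 0 with h | h | h
    · rw [pvC_neg L h]; exact List.Pairwise.nil
    · subst h; rw [pvC_zero]; simp
    · omega
  | succ n ih =>
    intro L hL
    by_cases h0 : L = 0
    · subst h0; rw [pvC_zero]; simp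
    · rw [pvC_ne L h0]
      apply pvLex_flatMap
      · exact List.Pairwise.filter _ (by decide : pvParts.Pairwise (· < ·))
      · intro p hp
        rcases List.mem_filter.mp hp with ⟨hpP, hple⟩
        simp only [decide_eq_true_eq] at hple
        have hp1 := pvParts_pos p hpP
        apply List.pairwise_map.mpr
        exact (ih (L - p) (by omega)).imp (fun h => List.Lex.cons h)
      · intro p _ x hx
        rcases List.mem_map.mp hx with ⟨t, _, rfl⟩
        exact ⟨t, rfl⟩

lemma pvC_closed (L : Int) : ∀ x ∈ pvC L, pysort x ∈ pvC L := by
  intro x hx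
  have hs := pvC_spec L.toNat L (le_refl _) x hx
  apply pvC_complete
  · intro a ha
    exact hs.1 a ((pysort_perm x).mem_iff.mp ha)
  · rw [(pysort_perm x).sum_eq, hs.2]

-- ---- selection sort is Python's sorted ----
-- the inner argmin fold
def pvAm (a : List Int) (l : List Nat) (mi : Nat) : Nat :=
  l.foldl (fun mi j => if a.getD j 0 < a.getD mi 0 then j else mi) mi

-- one pass of the outer loop
def pvStep (a : List Int) (i : Nat) : List Int :=
  let mi := pvAm a (List.range' (i + 1) (a.length - (i + 1))) i
  let vi := a.getD i 0
  let vm := a.getD mi 0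
  (a.set i vm).set mi vi

lemma selection_sort_eq_foldl (arr : List Int) :
    selection_sort arr = (List.range arr.length).foldl pvStep arr := rfl

lemma pvAm_spec (a : List Int) : ∀ (k b mi : Nat),
    (pvAm a (List.range' b k) mi = mi ∨ pvAm a (List.range' b k) mi ∈ List.range' b k)
    ∧ a.getD (pvAm a (List.range' b k) mi) 0 ≤ a.getD mi 0
    ∧ ∀ j ∈ List.range' b k, a.getD (pvAm a (List.range' b k) mi) 0 ≤ a.getD j 0 := by
  intro k
  induction k with
  | zero =>
    intro b mi
    refine ⟨Or.inl rfl, le_refl _, ?_⟩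
    intro j hj
    simp at hj
  | succ k ih =>
    intro b mi
    have hrec : pvAm a (List.range' b (k+1)) mi
        = pvAm a (List.range' (b+1) k) (if a.getD b 0 < a.getD mi 0 then b else mi) := by
      rw [List.range'_succ]
      rfl
    set mi' := if a.getD b 0 < a.getD mi 0 then b else mi with hmi'
    obtain ⟨h1, h2, h3⟩ := ih (b+1) mi'
    have hmem : ∀ r, r = mi' ∨ r ∈ List.range' (b+1) k →
        r = mi ∨ r ∈ List.range' b (k+1) := by
      intro r hr
      rcases hr with rfl | hr
      · by_cases hb : a.getD b 0 < a.getD mi 0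
        · right
          rw [hmi', if_pos hb]
          exact List.mem_range'_1.mpr ⟨le_refl _, by omega⟩
        · left
          rw [hmi', if_neg hb]
      · right
        rcases List.mem_range'_1.mp hr with ⟨hr1, hr2⟩
        exact List.mem_range'_1.mpr ⟨by omega, by omega⟩
    have hmile : a.getD mi' 0 ≤ a.getD mi 0 := by
      by_cases hb : a.getD b 0 < a.getD mi 0
      · rw [hmi', if_pos hb]; exact le_of_lt hb
      · rw [hmi', if_neg hb]
    have hmib : a.getD mi' 0 ≤ a.getD b 0 := by
      by_cases hb : a.getD b 0 < a.getD mi 0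
      · rw [hmi', if_pos hb]
      · rw [hmi', if_neg hb]; omega
    refine ⟨?_, ?_, ?_⟩
    · rw [hrec]; exact hmem _ h1
    · rw [hrec]; exact le_trans h2 hmile
    · intro j hj
      rw [List.range'_succ] at hj
      rcases List.mem_cons.mp hj with rfl | hj
      · rw [hrec]; exact le_trans h2 hmib
      · rw [hrec]; exact h3 j hj

lemma pvAm_call (a : List Int) (i : Nat) (hi : i < a.length) :
    i ≤ pvAm a (List.range' (i + 1) (a.length - (i + 1))) i
    ∧ pvAm a (List.range' (i + 1) (a.length - (i + 1))) i < a.length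
    ∧ ∀ j, i ≤ j → j < a.length →
        a.getD (pvAm a (List.range' (i + 1) (a.length - (i + 1))) i) 0 ≤ a.getD j 0 := by
  obtain ⟨h1, h2, h3⟩ := pvAm_spec a (a.length - (i + 1)) (i + 1) i
  have hloc : i ≤ pvAm a (List.range' (i + 1) (a.length - (i + 1))) i
      ∧ pvAm a (List.range' (i + 1) (a.length - (i + 1))) i < a.length := by
    rcases h1 with h | h
    · rw [h]; omega
    · rcases List.mem_range'_1.mp h with ⟨ha, hb⟩
      omega
  refine ⟨hloc.1, hloc.2, ?_⟩
  intro j hij hjl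
  rcases eq_or_lt_of_le hij with rfl | hij
  · exact h2
  · exact h3 j (List.mem_range'_1.mpr ⟨by omega, by omega⟩)

lemma pvSwapConsPerm : ∀ (t : List Int) (m : Nat) (x : Int), m < t.length →
    ((t.getD m 0) :: t.set m x).Perm (x :: t) := by
  intro t
  induction t with
  | nil =>
    intro m x h
    simp at h
  | cons y t ih =>
    intro m x h
    cases m with
    | zero =>
      simp only [List.getD_cons_zero, List.set_cons_zero]
      exact List.Perm.swap x y t
    | succ k =>
      simp only [List.getD_cons_succ, List.set_cons_succ]
      exact (List.Perm.swap _ _ _).trans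
        (((ih k x (by simpa using h)).cons y).trans (List.Perm.swap _ _ _))

lemma pvSwapPerm : ∀ (a : List Int) (i j : Nat), i < a.length → j < a.length →
    ((a.set i (a.getD j 0)).set j (a.getD i 0)).Perm a := by
  intro a
  induction a with
  | nil =>
    intro i j h
    simp at h
  | cons x t ih =>
    intro i j hi hj
    cases i with
    | zero =>
      cases j with
      | zero => simp
      | succ m =>
        simp only [List.getD_cons_succ, List.getD_cons_zero, List.set_cons_zero,
          List.set_cons_succ]
        exact pvSwapConsPerm t m x (by simpa using hj)
    | succ n =>
      cases j with
      | zero =>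
        simp only [List.getD_cons_succ, List.getD_cons_zero, List.set_cons_zero,
          List.set_cons_succ]
        exact pvSwapConsPerm t n x (by simpa using hi)
      | succ m =>
        simp only [List.getD_cons_succ, List.set_cons_succ]
        exact (ih n m (by simpa using hi) (by simpa using hj)).cons x

lemma pvOuter (arr : List Int) : ∀ (m k : Nat) (a : List Int),
    k + m = a.length → a.length = arr.length → a.Perm arr →
    (a.take k).Pairwise (· ≤ ·) →
    (∀ x ∈ a.take k, ∀ y ∈ a.drop k, x ≤ y) →
    ((List.range' k m).foldl pvStep a).Perm arr
      ∧ ((List.range' k m).foldl pvStep a).Pairwise (· ≤ ·) := by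
  intro m
  induction m with
  | zero =>
    intro k a hk hlen hperm hsort _
    simp only [List.range'_zero, List.foldl_nil]
    refine ⟨hperm, ?_⟩
    have htk : a.take k = a := List.take_of_length_le (by omega)
    rwa [htk] at hsort
  | succ m ih =>
    intro k a hk hlen hperm hsort hcross
    rw [List.range'_succ, List.foldl_cons]
    have hkl : k < a.length := by omega
    obtain ⟨hkM, hMl, hMmin⟩ := pvAm_call a k hkl
    set M := pvAm a (List.range' (k + 1) (a.length - (k + 1))) k with hM
    have ha' : pvStep a k = (a.set k (a.getD M 0)).set M (a.getD k 0) := rfl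
    have H1 : (pvStep a k).length = a.length := by rw [ha']; simp
    have H2 : (pvStep a k).Perm a := by rw [ha']; exact pvSwapPerm a k M hkl hMl
    have H3 : (pvStep a k).take k = a.take k := by
      rw [ha', List.take_set_of_le hkM, List.take_set_of_le (le_refl k)]
    have hk' : k < (pvStep a k).length := by omega
    have H4 : (pvStep a k).getD k 0 = a.getD M 0 := by
      rw [ha']
      by_cases hMk : M = k
      · rw [hMk]
        have hl2 : k < ((a.set k (a.getD k 0)).set k (a.getD k 0)).length := by
          simpa using hkl
        rw [List.getD_eq_getElem _ 0 hl2, List.getElem_set_self]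
      · have hl2 : k < ((a.set k (a.getD M 0)).set M (a.getD k 0)).length := by
          simpa using hkl
        rw [List.getD_eq_getElem _ 0 hl2, List.getElem_set_ne (by omega),
          List.getElem_set_self]
    have hMdrop : a.getD M 0 ∈ a.drop k := by
      have hidx : k + (M - k) < a.length := by omega
      have hlt : M - k < (a.drop k).length := by
        rw [List.length_drop]
        omega
      have hdg : (a.drop k)[M - k]'hlt = a[k + (M - k)]'hidx := List.getElem_drop ..
      rw [List.getD_eq_getElem a 0 hMl]
      apply List.mem_iff_getElem.mpr
      refine ⟨M - k, hlt, ?_⟩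
      rw [hdg]
      congr 1
      omega
    have htake : (pvStep a k).take (k + 1) = a.take k ++ [a.getD M 0] := by
      rw [List.take_add_one, H3, List.getElem?_eq_getElem hk']
      rw [← List.getD_eq_getElem _ 0 hk', H4]
      rfl
    have hdp : ((pvStep a k).drop k).Perm (a.drop k) := by
      apply (List.perm_append_left_iff (a.take k)).mp
      have e1 : List.take k a ++ List.drop k (pvStep a k) = pvStep a k := by
        rw [← H3]
        exact List.take_append_drop ..
      have e2 : List.take k a ++ List.drop k a = a := List.take_append_drop ..
      rw [e1, e2]
      exact H2
    have hdropsub : ∀ y ∈ (pvStep a k).drop (k + 1), y ∈ a.drop k := by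
      intro y hy
      have h1 : (pvStep a k).drop (k + 1) = ((pvStep a k).drop k).drop 1 := by
        rw [List.drop_drop]
      rw [h1] at hy
      exact hdp.mem_iff.mp (List.mem_of_mem_drop hy)
    have hdropidx : ∀ y ∈ a.drop k, ∃ j, k ≤ j ∧ j < a.length ∧ y = a.getD j 0 := by
      intro y hy
      rcases List.mem_iff_getElem.mp hy with ⟨t, ht, hyt⟩
      have ht' : k + t < a.length := by
        rw [List.length_drop] at ht
        omega
      refine ⟨k + t, by omega, ht', ?_⟩
      rw [List.getD_eq_getElem a 0 ht', ← List.getElem_drop, hyt]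
      exact ht
    have hsort' : ((pvStep a k).take (k + 1)).Pairwise (· ≤ ·) := by
      rw [htake, List.pairwise_append]
      refine ⟨hsort, by simp, ?_⟩
      intro x hx y hy
      rw [List.mem_singleton] at hy
      subst hy
      exact hcross x hx _ hMdrop
    have hcross' : ∀ x ∈ (pvStep a k).take (k + 1), ∀ y ∈ (pvStep a k).drop (k + 1), x ≤ y := by
      intro x hx y hy
      have hy' := hdropsub y hy
      rcases hdropidx y hy' with ⟨j, hj1, hj2, rfl⟩
      rw [htake] at hx
      rcases List.mem_append.mp hx with hx | hx
      · exact hcross x hx _ hy'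
      · rw [List.mem_singleton] at hx
        subst hx
        exact hMmin j hj1 hj2
    exact ih (k + 1) (pvStep a k) (by omega) (by omega) (H2.trans hperm) hsort' hcross'

lemma selection_sort_perm_pairwise (l : List Int) :
    (selection_sort l).Perm l ∧ (selection_sort l).Pairwise (· ≤ ·) := by
  rw [selection_sort_eq_foldl, List.range_eq_range']
  exact pvOuter l l.length 0 l (by omega) rfl (List.Perm.refl l) (by simp) (by simp)

lemma selection_sort_eq_pysort (l : List Int) : selection_sort l = pysort l := by
  obtain ⟨hp, hs⟩ := selection_sort_perm_pairwise l
  exact (PySem.List.sorted_id_eq_of_perm_of_pairwise l (selection_sort l) hp hs).symm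

-- ---- the loop emits pvE ----
lemma aLoop_eq (stack : List (Int × List Int)) (acc : List (List Int)) :
    aLoop stack acc = PySem.Set.update acc (stack.flatMap (fun t => pvE t.1 t.2)) := by
  induction stack, acc using aLoop.induct with
  | case1 acc =>
    rw [aLoop]
    simp [PySem.Set.update_nil]
  | case2 comb rest acc ih =>
    rw [aLoop]
    rw [ih]
    simp [List.flatMap_cons, pvE_zero, PySem.Set.update_cons]
  | case3 L comb rest acc h ih =>
    rw [aLoop]
    simp only [if_neg h]
    simp only [dite_eq_ite] at ih
    rw [ih, pvPush_eq, List.flatMap_append, List.flatMap_cons, List.flatMap_map,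
      PySem.Set.update_append, PySem.Set.update_append, pvE_ne L comb h]

lemma pvE_eq : ∀ (n : Nat) (L : Int) (comb : List Int), L.toNat ≤ n →
    pvE L comb = (pvC L).map (fun x => selection_sort (comb ++ x)) := by
  intro n
  induction n with
  | zero =>
    intro L comb hL
    rcases lt_trichotomy L 0 with h | h | h
    · rw [pvC_neg L h, pvE_ne L comb (by omega), pvFilter_nonpos L (by omega)]
      rfl
    · subst h
      rw [pvE_zero, pvC_zero]
      simp
    · omega
  | succ n ih =>
    intro L comb hL
    by_cases h0 : L = 0
    · subst h0
      rw [pvE_zero, pvC_zero]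
      simp
    · rw [pvE_ne L comb h0, pvC_ne L h0, List.map_flatMap]
      apply List.flatMap_congr
      intro p hp
      rcases List.mem_filter.mp hp with ⟨hpP, hple⟩
      simp only [decide_eq_true_eq] at hple
      have hp1 := pvParts_pos p hpP
      rw [ih (L - p) (comb ++ [p]) (by omega), List.map_map]
      apply List.map_congr_left
      intro t _
      simp

-- ---- dedup of the sorted compositions, in first-occurrence order ----
lemma pvDedup_map_sort (c : List (List Int)) :
    c.Pairwise (List.Lex (· < ·)) → (∀ x ∈ c, pysort x ∈ c) →
    PySem.Set.ofList (c.map pysort) = c.filter (fun x => pysort x == x) := by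
  induction c using List.reverseRecOn with
  | nil =>
    intro _ _
    rfl
  | append_singleton c' x ih =>
    intro hp hc
    have hdec := List.pairwise_append.mp hp
    have hlt : ∀ y ∈ c', List.Lex (· < ·) y x := fun y hy => hdec.2.2 y hy x (by simp)
    have hxne : x ∉ c' := fun hx => Std.Irrefl.irrefl x (hlt x hx)
    have hc' : ∀ y ∈ c', pysort y ∈ c' := by
      intro y hy
      have hmem : pysort y ∈ c' ++ [x] := hc y (by simp [hy])
      rcases List.mem_append.mp hmem with h | h
      · exact h
      · exfalso
        rw [List.mem_singleton] at h
        rcases pvSorted_lexle y with hs | hs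
        · rw [hs] at h
          subst h
          exact hxne hy
        · rw [h] at hs
          exact Std.Asymm.asymm y x (hlt y hy) hs
    have ihc := ih hdec.1 hc'
    rw [List.map_append, List.map_singleton, PySem.Set.ofList_append_singleton, ihc,
      List.filter_append]
    by_cases hasc : pysort x = x
    · have hnotmem : x ∉ c'.filter (fun y => pysort y == y) :=
        fun h => hxne (List.mem_of_mem_filter h)
      rw [hasc, PySem.Set.add_of_not_mem hnotmem]
      simp [hasc]
    · have hmem : pysort x ∈ c'.filter (fun y => pysort y == y) := by
        apply List.mem_filter.mpr
        constructor
        · have hmem2 : pysort x ∈ c' ++ [x] := hc x (by simp)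
          rcases List.mem_append.mp hmem2 with h | h
          · exact h
          · rw [List.mem_singleton] at h
            exact absurd h hasc
        · simp [pysort_pysort]
      rw [PySem.Set.add_of_mem hmem]
      simp [hasc]

-- ---- genB is the ascending filter of pvC ----
lemma pvFilter_and_flatMap (A B : Int → Bool) (f : Int → List (List Int)) :
    ∀ (l : List Int),
      (l.filter (fun p => A p && B p)).flatMap f
        = (l.filter B).flatMap (fun p => if A p then f p else []) := by
  intro l
  induction l with
  | nil => rfl
  | cons p l ih =>
    simp only [List.filter_cons]
    cases hA : A p <;> cases hB : B p <;>
      simp [List.flatMap_cons, hA, ih]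

lemma genB_eq_filter : ∀ (n : Nat) (L m : Int), L.toNat ≤ n →
    genB L m = (pvC L).filter (fun x => pysort x == x && decide (∀ a ∈ x, m ≤ a)) := by
  intro n
  induction n with
  | zero =>
    intro L m hL
    rcases lt_trichotomy L 0 with h | h | h
    · rw [pvC_neg L h, genB_ne L m (by omega)]
      have : pvParts.filter (fun p => m ≤ p ∧ p ≤ L) = [] := by
        apply List.filter_eq_nil_iff.mpr
        intro p hp
        have := pvParts_pos p hp
        simp only [decide_eq_true_eq]
        omega
      rw [this]
      rfl
    · subst h
      rw [genB_zero, pvC_zero]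
      have hnilpred : ((pysort ([] : List Int) == ([] : List Int)) && decide (∀ a ∈ ([] : List Int), m ≤ a)) = true := by
        simp [pysort, PySem.List.sorted_eq_nil_iff]
      simp only [List.filter_cons, List.filter_nil, hnilpred, if_true]
    · omega
  | succ n ih =>
    intro L m hL
    by_cases h0 : L = 0
    · subst h0
      rw [genB_zero, pvC_zero]
      have hnilpred : ((pysort ([] : List Int) == ([] : List Int)) && decide (∀ a ∈ ([] : List Int), m ≤ a)) = true := by
        simp [pysort, PySem.List.sorted_eq_nil_iff]
      simp only [List.filter_cons, List.filter_nil, hnilpred, if_true]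
    · rw [genB_ne L m h0, pvC_ne L h0, List.filter_flatMap]
      have hand : (fun p => decide (m ≤ p ∧ p ≤ L)) = (fun p => decide (m ≤ p) && decide (p ≤ L)) := by
        funext p
        rw [Bool.decide_and]
      rw [hand, pvFilter_and_flatMap (fun p => decide (m ≤ p)) (fun p => decide (p ≤ L))]
      apply List.flatMap_congr
      intro p hp
      rcases List.mem_filter.mp hp with ⟨hpP, hple⟩
      simp only [decide_eq_true_eq] at hple
      have hp1 := pvParts_pos p hpP
      rw [List.filter_map]
      by_cases hmp : m ≤ p
      · rw [if_pos (by simpa using hmp), ih (L - p) p (by omega)]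
        congr 1
        apply List.filter_congr
        intro x hx
        simp only [Function.comp]
        have h1 : (pysort (p :: x) == p :: x) = (pysort x == x && decide (∀ a ∈ x, p ≤ a)) := by
          by_cases hpx : (pysort x = x ∧ ∀ a ∈ x, p ≤ a)
          · have hpw : (p :: x).Pairwise (· ≤ ·) := by
              rw [List.pairwise_cons]
              exact ⟨hpx.2, (pysort_eq_self_iff x).mp hpx.1⟩
            have h2 := (pysort_eq_self_iff (p :: x)).mpr hpw
            have hd : decide (∀ a ∈ x, p ≤ a) = true := by simpa using hpx.2
            simp [h2, hpx.1, hd]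
          · have h2 : ¬ pysort (p :: x) = p :: x := by
              intro hh
              have hpw := List.pairwise_cons.mp ((pysort_eq_self_iff (p :: x)).mp hh)
              exact hpx ⟨(pysort_eq_self_iff x).mpr hpw.2, hpw.1⟩
            have b2 : (pysort (p :: x) == p :: x) = false := by
              simpa using h2
            rcases Classical.em (pysort x = x) with h3 | h3
            · have h4 : ¬ ∀ a ∈ x, p ≤ a := fun h => hpx ⟨h3, h⟩
              have b4 : decide (∀ a ∈ x, p ≤ a) = false := by simpa using h4
              simp only [b2, b4, Bool.and_false]
            · have b3 : (pysort x == x) = false := by simpa using h3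
              simp only [b2, b3, Bool.false_and]
        rw [h1]
        by_cases hall : ∀ a ∈ x, p ≤ a
        · have hm : ∀ a ∈ p :: x, m ≤ a := by
            intro a ha
            rcases List.mem_cons.mp ha with rfl | ha
            · exact hmp
            · exact le_trans hmp (hall a ha)
          have hd : decide (∀ a ∈ x, p ≤ a) = true := by simpa using hall
          have hdm : decide (∀ a ∈ p :: x, m ≤ a) = true := by simpa using hm
          simp only [hd, hdm, Bool.and_true]
        · have hd : decide (∀ a ∈ x, p ≤ a) = false := by simpa using hall
          simp only [hd, Bool.and_false, Bool.false_and]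
      · rw [if_neg (by simpa using hmp)]
        have hnil : (pvC (L - p)).filter ((fun x => pysort x == x && decide (∀ a ∈ x, m ≤ a)) ∘ (fun x => p :: x)) = [] := by
          apply List.filter_eq_nil_iff.mpr
          intro x _
          simp only [Function.comp, Bool.and_eq_true, decide_eq_true_eq, not_and]
          intro _ hALL
          exact hmp (hALL p (by simp))
        rw [hnil, List.map_nil]

lemma pvC_nodup (L : Int) : (pvC L).Nodup := by
  refine (pvC_pairwise L.toNat L (le_refl _)).imp ?_
  intro a b hab he
  subst he
  exact Std.Irrefl.irrefl a hab

-- ===== VERDICT (by name: the statement is the Claim_ definition above) =====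
theorem find_permutations_iteratively_spec : Claim_equal_find_permutations_iteratively := by
  intro n _
  unfold Spec_find_permutations_iteratively find_permutations_iteratively find_permutations_iteratively_alt
  rw [aLoop_eq]
  have h1 : ([(n, ([] : List Int))].flatMap (fun t => pvE t.1 t.2)) = pvE n [] := by simp
  rw [h1]
  have h2 : PySem.Set.update PySem.Set.empty (pvE n []) = PySem.Set.ofList (pvE n []) := rfl
  rw [h2, pvE_eq n.toNat n [] (le_refl _)]
  have h3 : (pvC n).map (fun x => selection_sort ([] ++ x)) = (pvC n).map pysort := by
    apply List.map_congr_left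
    intro t _
    rw [List.nil_append, selection_sort_eq_pysort]
  rw [h3, pvDedup_map_sort (pvC n) (pvC_pairwise n.toNat n (le_refl _)) (pvC_closed n),
    genB_eq_filter n.toNat n 1 (le_refl _)]
  have h4 : (pvC n).filter (fun x => pysort x == x && decide (∀ a ∈ x, (1:Int) ≤ a))
      = (pvC n).filter (fun x => pysort x == x) := by
    apply List.filter_congr
    intro x hx
    have hall : ∀ a ∈ x, (1:Int) ≤ a := by
      intro a ha
      exact pvParts_pos a ((pvC_spec n.toNat n (le_refl _) x hx).1 a ha)
    have hd : decide (∀ a ∈ x, (1:Int) ≤ a) = true := by simpa using hall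
    rw [hd, Bool.and_true]
  rw [h4]
  exact (PySem.Set.ofList_eq_self_of_nodup _ (List.Nodup.filter _ (pvC_nodup n))).symm
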